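-- pv_equiv track=rewrite | github.com/FelipeCastano/sentence_tagging | src/model/utils.py | assign_unk_english
-- ===== SOURCE A (Python) =====
-- import string
--
-- punct = set(string.punctuation)
--
-- noun_suffix = ["action", "age", "ance", "cy", "dom", "ee", "ence", "er", "hood", "ion", "ism", "ist", "ity", "ling", "ment", "ness", "or", "ry", "scape", "ship", "ty"]
--
-- verb_suffix = ["ate", "ify", "ise", "ize"]
--
-- adj_suffix = ["able", "ese", "ful", "i", "ian", "ible", "ic", "ish", "ive", "less", "ly", "ous"]
--
-- adv_suffix = ["ward", "wards", "wise"]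
--
-- def assign_unk_english(tok):
--     """
--     Assign unknown word tokens
--     """
--     # Digits
--     if any(char.isdigit() for char in tok):
--         return "--unk_digit--"
--
--     # Punctuation
--     elif any(char in punct for char in tok):
--         return "--unk_punct--"
--
--     # Upper-case
--     elif any(char.isupper() for char in tok):
--         return "--unk_upper--"
--
--     # Nouns
--     elif any(tok.endswith(suffix) for suffix in noun_suffix):
--         return "--unk_noun--"
--
--     # Verbs
--     elif any(tok.endswith(suffix) for suffix in verb_suffix):
--         return "--unk_verb--"
--
--     # Adjectives
--     elif any(tok.endswith(suffix) for suffix in adj_suffix):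
--         return "--unk_adj--"
--
--     # Adverbs
--     elif any(tok.endswith(suffix) for suffix in adv_suffix):
--         return "--unk_adv--"
--
--     return "--unk--"
-- ===== SOURCE B (Python) =====
-- import string
--
-- punct = set(string.punctuation)
--
-- noun_suffix = ["action", "age", "ance", "cy", "dom", "ee", "ence", "er", "hood", "ion", "ism", "ist", "ity", "ling", "ment", "ness", "or", "ry", "scape", "ship", "ty"]
-- verb_suffix = ["ate", "ify", "ise", "ize"]
-- adj_suffix = ["able", "ese", "ful", "i", "ian", "ible", "ic", "ish", "ive", "less", "ly", "ous"]
-- adv_suffix = ["ward", "wards", "wise"]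
--
-- # rank 0..7 -> tag; the answer is TAGS[minimal rank seen]
-- _TAGS = ["--unk_digit--", "--unk_punct--", "--unk_upper--", "--unk_noun--",
--          "--unk_verb--", "--unk_adj--", "--unk_adv--", "--unk--"]
--
-- # hash index: exact suffix string -> its rank (suffix lists are pairwise disjoint)
-- _SUFFIX_RANK = {}
-- for _r, _group in ((3, noun_suffix), (4, verb_suffix), (5, adj_suffix), (6, adv_suffix)):
--     for _s in _group:
--         _SUFFIX_RANK[_s] = _r
--
-- def assign_unk_english(tok):
--     """
--     Assign unknown word tokens
--     """
--     best = 7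
--     for ch in tok:
--         if ch.isdigit():
--             r = 0
--         elif ch in punct:
--             r = 1
--         elif ch.isupper():
--             r = 2
--         else:
--             r = 7
--         if r < best:
--             best = r
--     n = len(tok)
--     for k in range(1, 7):
--         if k <= n:
--             r = _SUFFIX_RANK.get(tok[n - k:], 7)
--             if r < best:
--                 best = r
--     return _TAGS[best]
-- ===== Notes on version B (the rewrite author's own statement) =====
-- stated objective: alternative
-- what changed: Replaces A's early-return chain of seven any()/endswith scans by a minimal-rank computation: one character pass keeping the minimum character rank, a dict keyed by exact suffix string probed with the six possible tails tok[n-k:] (replacing the 40 endswith tests), and a final tag-table lookup indexed by the minimal rank.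
import Mathlib
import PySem

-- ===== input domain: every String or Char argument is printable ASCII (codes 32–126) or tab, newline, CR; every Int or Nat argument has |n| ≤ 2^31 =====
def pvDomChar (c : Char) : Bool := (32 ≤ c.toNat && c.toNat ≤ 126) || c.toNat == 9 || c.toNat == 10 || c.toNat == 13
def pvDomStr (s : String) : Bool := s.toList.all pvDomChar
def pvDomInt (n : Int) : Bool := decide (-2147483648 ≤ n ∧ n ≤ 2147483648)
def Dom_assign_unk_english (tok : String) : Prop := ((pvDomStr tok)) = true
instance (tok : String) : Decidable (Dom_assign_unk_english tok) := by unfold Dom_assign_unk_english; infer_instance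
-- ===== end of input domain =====

set_option maxRecDepth 10000

-- B replaces A's early-return chain of seven any()/endswith scans by a single numeric
-- "minimal rank" computation: one pass over the characters keeps the minimum character
-- rank, then the six possible tails tok[n-k:] are looked up in a dict keyed by exact
-- suffix string (a hash index replacing the 40 endswith tests), and the answer is a
-- tag-table entry indexed by the minimal rank (objective: alternative formulation).

-- ===== PORT A =====
def punctSet : PySem.Set Char := PySem.Set.ofList "!\"#$%&'()*+,-./:;<=>?@[\\]^_`{|}~".toList

def nounSuffix : List String := ["action", "age", "ance", "cy", "dom", "ee", "ence", "er", "hood", "ion", "ism", "ist", "ity", "ling", "ment", "ness", "or", "ry", "scape", "ship", "ty"]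
def verbSuffix : List String := ["ate", "ify", "ise", "ize"]
def adjSuffix : List String := ["able", "ese", "ful", "i", "ian", "ible", "ic", "ish", "ive", "less", "ly", "ous"]
def advSuffix : List String := ["ward", "wards", "wise"]

def assign_unk_english (tok : String) : String :=
  if tok.toList.any (fun c => PySem.Chars.isdigit c) then "--unk_digit--"
  else if tok.toList.any (fun c => PySem.Set.contains punctSet c) then "--unk_punct--"
  else if tok.toList.any (fun c => PySem.Chars.isupper c) then "--unk_upper--"
  else if nounSuffix.any (fun s => PySem.Str.endswith tok s) then "--unk_noun--"
  else if verbSuffix.any (fun s => PySem.Str.endswith tok s) then "--unk_verb--"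
  else if adjSuffix.any (fun s => PySem.Str.endswith tok s) then "--unk_adj--"
  else if advSuffix.any (fun s => PySem.Str.endswith tok s) then "--unk_adv--"
  else "--unk--"

-- ===== PORT B =====
def tagTable : List String :=
  ["--unk_digit--", "--unk_punct--", "--unk_upper--", "--unk_noun--",
   "--unk_verb--", "--unk_adj--", "--unk_adv--", "--unk--"]

def rankGroups : List (Nat × List String) :=
  [(3, nounSuffix), (4, verbSuffix), (5, adjSuffix), (6, advSuffix)]

def suffixRank : PySem.Dict String Nat :=
  rankGroups.foldl (fun d p => p.2.foldl (fun d s => d.insert s p.1) d) PySem.Dict.empty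

def assign_unk_english_alt (tok : String) : String :=
  let best0 : Nat := tok.toList.foldl
    (fun best ch =>
      let r : Nat :=
        if PySem.Chars.isdigit ch then 0
        else if PySem.Set.contains punctSet ch then 1
        else if PySem.Chars.isupper ch then 2
        else 7
      if r < best then r else best) 7
  let n : Nat := tok.toList.length
  let best : Nat := (PySem.List.pyRange 1 7 1).foldl
    (fun best k =>
      if k ≤ (n : Int) then
        let r : Nat := suffixRank.getD
          (String.ofList (PySem.List.slice tok.toList (some ((n : Int) - k)) none)) 7
        if r < best then r else best
      else best) best0
  -- _TAGS[best]: best ≤ 7 always, so the default is unreachable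
  tagTable.getD best "--unk--"

-- ===== PRECONDITION & SPEC =====
def Spec_assign_unk_english (tok : String) (out : String) : Prop := out = assign_unk_english_alt tok
instance (tok : String) (out : String) : Decidable (Spec_assign_unk_english tok out) := by unfold Spec_assign_unk_english; infer_instance

-- ===== CLAIM (what is proved, stated in full; the proofs are below) =====
def Claim_equal_assign_unk_english : Prop := ∀ (tok : String), Dom_assign_unk_english tok → Spec_assign_unk_english tok (assign_unk_english tok)

-- ===== LEMMAS AND PROOFS =====

-- rank of a single character, and of a whole character list (= B's first pass)
def crank (c : Char) : Nat :=
  if PySem.Chars.isdigit c then 0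
  else if PySem.Set.contains punctSet c then 1
  else if PySem.Chars.isupper c then 2
  else 7

def charCls (l : List Char) : Nat :=
  if l.any (fun c => PySem.Chars.isdigit c) then 0
  else if l.any (fun c => PySem.Set.contains punctSet c) then 1
  else if l.any (fun c => PySem.Chars.isupper c) then 2
  else 7

theorem charCls_le (l : List Char) : charCls l ≤ 7 := by
  unfold charCls; split_ifs <;> omega

theorem charCls_cons (c : Char) (l : List Char) :
    charCls (c :: l) = min (crank c) (charCls l) := by
  unfold charCls crank
  cases h1 : PySem.Chars.isdigit c <;>
    cases h2 : PySem.Set.contains punctSet c <;>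
      cases h3 : PySem.Chars.isupper c <;>
        (simp_all [Nat.min_def]; try (split_ifs <;> omega))

-- B's single character pass computes min(init, charCls)
theorem foldl_charRank (l : List Char) (b : Nat) (hb : b ≤ 7) :
    l.foldl
      (fun best ch =>
        if (if PySem.Chars.isdigit ch then 0
            else if PySem.Set.contains punctSet ch then 1
            else if PySem.Chars.isupper ch then 2
            else 7) < best
        then (if PySem.Chars.isdigit ch then 0
              else if PySem.Set.contains punctSet ch then 1
              else if PySem.Chars.isupper ch then 2
              else 7)
        else best) b = min b (charCls l) := by
  induction l generalizing b with
  | nil => simp [charCls]; omega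
  | cons c l ih =>
    simp only [List.foldl_cons]
    have hstep : (if crank c < b then crank c else b) = min (crank c) b := by
      split_ifs <;> omega
    simp only [crank] at hstep
    rw [hstep]
    have hc : crank c ≤ 7 := by unfold crank; split_ifs <;> omega
    simp only [crank] at hc
    rw [ih _ (by omega), charCls_cons]
    simp only [crank]
    omega

-- generic facts about B's guarded min-fold over the candidate tail lengths
theorem gfold_le_init {p : Int → Prop} [DecidablePred p] (ks : List Int) (f : Int → Nat) (b : Nat) :
    ks.foldl (fun best k => if p k then (if f k < best then f k else best) else best) b ≤ b := by
  induction ks generalizing b with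
  | nil => simp
  | cons k ks ih =>
    simp only [List.foldl_cons]
    split_ifs with h1 h2
    · exact le_trans (ih _) (by omega)
    · exact ih b
    · exact ih b

theorem gfold_le_of_mem {p : Int → Prop} [DecidablePred p] (ks : List Int) (f : Int → Nat) (b : Nat)
    (k : Int) (hk : k ∈ ks) (hg : p k) :
    ks.foldl (fun best k => if p k then (if f k < best then f k else best) else best) b ≤ f k := by
  induction ks generalizing b with
  | nil => simp at hk
  | cons k' ks ih =>
    simp only [List.foldl_cons]
    rcases List.mem_cons.mp hk with h | h
    · subst h
      rw [if_pos hg]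
      split_ifs with h2
      · exact le_trans (gfold_le_init ks f _) (by omega)
      · exact le_trans (gfold_le_init ks f _) (by omega)
    · exact ih _ h

theorem gfold_eq_init_or_mem {p : Int → Prop} [DecidablePred p] (ks : List Int) (f : Int → Nat) (b : Nat) :
    ks.foldl (fun best k => if p k then (if f k < best then f k else best) else best) b = b ∨
      ∃ k ∈ ks, p k ∧
        ks.foldl (fun best k => if p k then (if f k < best then f k else best) else best) b = f k := by
  induction ks generalizing b with
  | nil => left; simp
  | cons k' ks ih =>
    simp only [List.foldl_cons]
    split_ifs with h1 h2
    · rcases ih (f k') with h | ⟨k, hk, hg, he⟩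
      · right; exact ⟨k', by simp, h1, h⟩
      · right; exact ⟨k, by simp [hk], hg, he⟩
    · rcases ih b with h | ⟨k, hk, hg, he⟩
      · left; exact h
      · right; exact ⟨k, by simp [hk], hg, he⟩
    · rcases ih b with h | ⟨k, hk, hg, he⟩
      · left; exact h
      · right; exact ⟨k, by simp [hk], hg, he⟩

-- concrete facts about the hash index (decided once on the literal data)
def groupOf (r : Nat) : List String :=
  if r = 3 then nounSuffix else if r = 4 then verbSuffix
  else if r = 5 then adjSuffix else if r = 6 then advSuffix else []

theorem suffixRank_items_facts :
    ∀ q ∈ suffixRank.items,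
      3 ≤ q.2 ∧ q.2 ≤ 6 ∧ 1 ≤ q.1.toList.length ∧ q.1.toList.length ≤ 6 ∧ q.1 ∈ groupOf q.2 := by
  decide

theorem suffixRank_get_group (r : Nat) (hr : 3 ≤ r) (hr' : r ≤ 6) :
    ∀ s ∈ groupOf r, suffixRank.get? s = some r := by
  interval_cases r <;> decide

-- any lookup in the hash index yields a rank ≥ 3
theorem suffixRank_getD_ge (t : String) : 3 ≤ suffixRank.getD t 7 := by
  rw [PySem.Dict.getD_eq_get?_getD]
  cases h : suffixRank.get? t with
  | none => simp
  | some r =>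
    have := (suffixRank_items_facts _ (PySem.Dict.mem_items_of_get?_eq_some _ h)).1
    simpa using this

-- the rank B looks up for candidate tail length k
def rkOf (tok : String) (k : Int) : Nat :=
  suffixRank.getD
    (String.ofList (PySem.List.slice tok.toList (some ((tok.toList.length : Int) - k)) none)) 7

-- a group match of A gives B's lookup the same rank at k = |s|
theorem match_lookup (tok : String) (r : Nat) (hr : 3 ≤ r) (hr' : r ≤ 6)
    (s : String) (hs : s ∈ groupOf r) (he : PySem.Str.endswith tok s = true) :
    1 ≤ s.toList.length ∧ s.toList.length ≤ 6 ∧ s.toList.length ≤ tok.toList.length ∧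
      rkOf tok (s.toList.length : Int) = r := by
  have hget : suffixRank.get? s = some r := suffixRank_get_group r hr hr' s hs
  have hfacts := suffixRank_items_facts _ (PySem.Dict.mem_items_of_get?_eq_some _ hget)
  have hsuf : s.toList <:+ tok.toList := by
    rw [PySem.Str.endswith_eq] at he
    exact (PySem.Chars.endswith_iff _ _).mp he
  have hlen : s.toList.length ≤ tok.toList.length := hsuf.length_le
  refine ⟨hfacts.2.2.1, hfacts.2.2.2.1, hlen, ?_⟩
  unfold rkOf
  have h0 : (0 : Int) ≤ (tok.toList.length : Int) - (s.toList.length : Int) := by omega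
  have hslice : PySem.List.slice tok.toList
      (some ((tok.toList.length : Int) - (s.toList.length : Int))) none
      = tok.toList.drop ((tok.toList.length : Int) - (s.toList.length : Int)).toNat :=
    PySem.List.slice_from tok.toList h0
  rw [hslice]
  have hdrop : tok.toList.drop ((tok.toList.length : Int) - (s.toList.length : Int)).toNat = s.toList := by
    have := List.suffix_iff_eq_drop.mp hsuf
    have htn : ((tok.toList.length : Int) - (s.toList.length : Int)).toNat
        = tok.toList.length - s.toList.length := by omega
    rw [htn]; exact this.symm
  rw [hdrop]
  simp [PySem.Dict.getD_eq_get?_getD, hget]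

-- a non-default lookup of B exhibits a matching suffix for A
theorem lookup_match (tok : String) (k : Int) (hne : rkOf tok k ≠ 7) :
    3 ≤ rkOf tok k ∧ rkOf tok k ≤ 6 ∧
      (groupOf (rkOf tok k)).any (fun s => PySem.Str.endswith tok s) = true := by
  unfold rkOf at hne ⊢
  set t := String.ofList (PySem.List.slice tok.toList (some ((tok.toList.length : Int) - k)) none) with ht
  rw [PySem.Dict.getD_eq_get?_getD] at hne ⊢
  cases h : suffixRank.get? t with
  | none => rw [h] at hne; simp at hne
  | some r =>
    simp only [Option.getD_some] at hne ⊢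
    have hfacts := suffixRank_items_facts _ (PySem.Dict.mem_items_of_get?_eq_some _ h)
    refine ⟨hfacts.1, hfacts.2.1, ?_⟩
    rw [List.any_eq_true]
    refine ⟨t, hfacts.2.2.2.2, ?_⟩
    rw [PySem.Str.endswith_eq, PySem.Chars.endswith_iff]
    have htl : t.toList = PySem.List.slice tok.toList (some ((tok.toList.length : Int) - k)) none := by
      rw [ht]; simp
    have hsl : PySem.List.slice tok.toList (some ((tok.toList.length : Int) - k)) none
        = tok.toList.drop (PySem.List.clampIdx tok.toList.length ((tok.toList.length : Int) - k)) :=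
      PySem.List.slice_some_none tok.toList _
    rw [htl, hsl]
    exact List.drop_suffix _ _

theorem main_lemma : ∀ tok : String, assign_unk_english tok = assign_unk_english_alt tok := by
  intro tok
  unfold assign_unk_english assign_unk_english_alt
  simp only [foldl_charRank tok.toList 7 (by omega)]
  have h7 : min 7 (charCls tok.toList) = charCls tok.toList := by
    have := charCls_le tok.toList; omega
  rw [h7]
  set l := tok.toList with hl
  set n := l.length with hn
  set f : Int → Nat := fun k =>
    suffixRank.getD (String.ofList (PySem.List.slice l (some ((n : Int) - k)) none)) 7 with hf
  have hfr : ∀ k, f k = rkOf tok k := by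
    intro k; rw [hf]; unfold rkOf; rw [← hl, ← hn]
  set best := (PySem.List.pyRange 1 7 1).foldl
    (fun best k => if k ≤ (n : Int) then (if f k < best then f k else best) else best)
    (charCls l) with hbest
  have H1 : best ≤ charCls l := gfold_le_init _ _ _
  have H3 : best = charCls l ∨ ∃ k ∈ PySem.List.pyRange 1 7 1, k ≤ (n : Int) ∧ best = f k :=
    gfold_eq_init_or_mem _ _ _
  have Hge : ∀ k, 3 ≤ f k := by intro k; rw [hf]; exact suffixRank_getD_ge _
  -- A's three character scans vs the character class
  cases hD : l.any (fun c => PySem.Chars.isdigit c) with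
  | true =>
    have hc : charCls l = 0 := by unfold charCls; rw [hD]; simp
    have : best = 0 := by omega
    rw [this]; rfl
  | false =>
  cases hP : l.any (fun c => PySem.Set.contains punctSet c) with
  | true =>
    have hc : charCls l = 1 := by unfold charCls; rw [hD, hP]; simp
    have hb1 : best = 1 := by
      rcases H3 with h | ⟨k, _, _, h⟩
      · omega
      · have := Hge k; omega
    rw [hb1]; rfl
  | false =>
  cases hU : l.any (fun c => PySem.Chars.isupper c) with
  | true =>
    have hc : charCls l = 2 := by unfold charCls; rw [hD, hP, hU]; simp
    have hb2 : best = 2 := by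
      rcases H3 with h | ⟨k, _, _, h⟩
      · omega
      · have := Hge k; omega
    rw [hb2]; rfl
  | false =>
  have hc : charCls l = 7 := by unfold charCls; rw [hD, hP, hU]; simp
  rw [hc] at H1 H3 hbest
  -- upper bound from a matching group, via the hash index
  have Hmatch : ∀ r, 3 ≤ r → r ≤ 6 →
      (groupOf r).any (fun s => PySem.Str.endswith tok s) = true → best ≤ r := by
    intro r h3 h6 hany
    rw [List.any_eq_true] at hany
    obtain ⟨s, hs, he⟩ := hany
    obtain ⟨hk1, hk6, hkn, hrk⟩ := match_lookup tok r h3 h6 s hs he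
    rw [← hl] at hkn
    have hmem : ((s.toList.length : Nat) : Int) ∈ PySem.List.pyRange 1 7 1 := by
      rw [PySem.List.mem_pyRange_one]; omega
    have := gfold_le_of_mem (p := fun k => k ≤ (n : Int)) (PySem.List.pyRange 1 7 1) f 7
      ((s.toList.length : Nat) : Int) hmem (by omega)
    rw [← hbest] at this
    rw [hfr] at this
    omega
  -- any value < 7 that best takes exhibits a match
  have Hval : ∀ r, best = r → r ≠ 7 →
      3 ≤ r ∧ r ≤ 6 ∧ (groupOf r).any (fun s => PySem.Str.endswith tok s) = true := by
    intro r hbr hr7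
    rcases H3 with h | ⟨k, _, _, h⟩
    · omega
    · rw [hfr] at h
      have hne : rkOf tok k ≠ 7 := by omega
      have hlm := lookup_match tok k hne
      rw [← h, hbr] at hlm
      exact hlm
  have Hge' : 3 ≤ best ∨ best = 7 := by
    rcases H3 with h | ⟨k, _, _, h⟩
    · omega
    · have := Hge k; omega
  have contra : ∀ (g : List String),
      (g.any (fun s => PySem.Str.endswith tok s)) = false →
      (g.any (fun s => PySem.Str.endswith tok s)) = true → False := by
    intro g h1 h2; rw [h1] at h2; exact Bool.false_ne_true h2
  -- now follow A's suffix chain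
  cases hN : nounSuffix.any (fun s => PySem.Str.endswith tok s) with
  | true =>
    have hle := Hmatch 3 (by omega) (by omega) (by simpa [groupOf] using hN)
    have : best = 3 := by omega
    rw [this]; rfl
  | false =>
  cases hV : verbSuffix.any (fun s => PySem.Str.endswith tok s) with
  | true =>
    have hle := Hmatch 4 (by omega) (by omega) (by simpa [groupOf] using hV)
    have hne3 : best ≠ 3 := by
      intro h
      exact contra nounSuffix hN (Hval 3 h (by omega)).2.2
    have : best = 4 := by omega
    rw [this]; rfl
  | false =>
  cases hJ : adjSuffix.any (fun s => PySem.Str.endswith tok s) with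
  | true =>
    have hle := Hmatch 5 (by omega) (by omega) (by simpa [groupOf] using hJ)
    have hne3 : best ≠ 3 := by
      intro h
      exact contra nounSuffix hN (Hval 3 h (by omega)).2.2
    have hne4 : best ≠ 4 := by
      intro h
      exact contra verbSuffix hV (Hval 4 h (by omega)).2.2
    have : best = 5 := by omega
    rw [this]; rfl
  | false =>
  cases hW : advSuffix.any (fun s => PySem.Str.endswith tok s) with
  | true =>
    have hle := Hmatch 6 (by omega) (by omega) (by simpa [groupOf] using hW)
    have hne3 : best ≠ 3 := by
      intro h
      exact contra nounSuffix hN (Hval 3 h (by omega)).2.2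
    have hne4 : best ≠ 4 := by
      intro h
      exact contra verbSuffix hV (Hval 4 h (by omega)).2.2
    have hne5 : best ≠ 5 := by
      intro h
      exact contra adjSuffix hJ (Hval 5 h (by omega)).2.2
    have : best = 6 := by omega
    rw [this]; rfl
  | false =>
  have hb7 : best = 7 := by
    by_contra hx
    rcases Hval best rfl hx with ⟨h3, h6, hany⟩
    rcases (by omega : best = 3 ∨ best = 4 ∨ best = 5 ∨ best = 6) with hb | hb | hb | hb <;>
      rw [hb] at hany
    exacts [contra nounSuffix hN hany, contra verbSuffix hV hany,
      contra adjSuffix hJ hany, contra advSuffix hW hany]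
  rw [hb7]; rfl

-- ===== VERDICT (by name: the statement is the Claim_ definition above) =====
theorem assign_unk_english_spec : Claim_equal_assign_unk_english := by
  intro tok _
  unfold Spec_assign_unk_english
  exact main_lemma tok
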